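-- pv_equiv track=rewrite | github.com/grapheneaffiliate/h4-polytopic-attention | solve_arc_batch.py | solve_4522001f
-- ===== SOURCE A (Python) =====
-- def solve_4522001f(grid):
--     nz = set()
--     for r in range(3):
--         for c in range(3):
--             if grid[r][c] != 0:
--                 nz.add((r,c))
--     block_r, block_c = 0, 0
--     for r0 in range(2):
--         for c0 in range(2):
--             if all((r0+dr, c0+dc) in nz for dr in range(2) for dc in range(2)):
--                 block_r, block_c = r0, c0
--     out = [[0]*9 for _ in range(9)]
--     if block_r == 0 and block_c == 0:
--         blocks = [(0,0), (4,4)]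
--     elif block_r == 0 and block_c == 1:
--         blocks = [(0,5), (4,1)]
--     elif block_r == 1 and block_c == 0:
--         blocks = [(5,0), (1,4)]
--     else:
--         blocks = [(1,1), (5,5)]
--     for br, bc in blocks:
--         for dr in range(4):
--             for dc in range(4):
--                 if 0 <= br+dr < 9 and 0 <= bc+dc < 9:
--                     out[br+dr][bc+dc] = 3
--     return out
-- ===== SOURCE B (Python) =====
-- def solve_4522001f(grid):
--     # Collect the candidate 2x2 windows whose four cells are all nonzero and take
--     # the last one (row-major over (0,1)x(0,1)), defaulting to (0,0).
--     hits = [(r, c) for r in (0, 1) for c in (0, 1)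
--             if not any(grid[r + dr][c + dc] == 0 for dr in (0, 1) for dc in (0, 1))]
--     br, bc = hits[-1] if hits else (0, 0)
--     # Emit the 9x9 output row by row: each row of the 8-row band [br, br+8)
--     # carries one 4-run of 3s, starting at bc for the half on the main diagonal
--     # and at bc+4 for the other half; rows outside the band are all zero.
--     rows = []
--     for i in range(9):
--         if br <= i < br + 8:
--             start = bc if (i - br < 4) == (br == bc) else bc + 4
--             rows.append([0] * start + [3] * 4 + [0] * (5 - start))
--         else:
--             rows.append([0] * 9)
--     return rows
-- ===== Notes on version B (the rewrite author's own statement) =====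
-- stated objective: alternative
-- what changed: B replaces A's nonzero-set plus last-wins mutation loop by a declarative candidate list (all-nonzero 2x2 windows, last element, default (0,0)), and replaces the four-way corner table plus in-place block painting of a zero table by emitting each output row directly as a concatenation [0]*start + [3]*4 + [0]*(5-start) with the run start derived arithmetically from the block position.
import Mathlib
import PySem

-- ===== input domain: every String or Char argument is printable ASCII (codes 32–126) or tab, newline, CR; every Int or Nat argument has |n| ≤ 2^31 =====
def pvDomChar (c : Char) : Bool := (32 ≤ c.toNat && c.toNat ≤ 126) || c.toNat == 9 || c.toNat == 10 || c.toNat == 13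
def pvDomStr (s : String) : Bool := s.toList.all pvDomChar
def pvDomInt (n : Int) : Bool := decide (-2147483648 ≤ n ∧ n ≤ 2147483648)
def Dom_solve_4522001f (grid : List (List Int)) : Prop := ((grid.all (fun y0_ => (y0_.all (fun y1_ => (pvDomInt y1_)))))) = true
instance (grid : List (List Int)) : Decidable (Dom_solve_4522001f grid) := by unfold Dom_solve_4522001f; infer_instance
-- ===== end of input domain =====

-- B builds a candidate list of all-nonzero 2x2 windows (last one wins, default (0,0))
-- instead of A's nonzero-set and mutating loop, and emits each output row directly as a
-- concatenation of zero/three runs instead of painting blocks into a zero table; same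
-- values, objective: alternative.

-- ===== PORT A =====
def solve_4522001f (grid : List (List Int)) : List (List Int) :=
  let nz : PySem.Set (Int × Int) :=
    (PySem.List.pyRange 0 3 1).foldl (fun nz r =>
      (PySem.List.pyRange 0 3 1).foldl (fun nz c =>
        if PySem.List.pyGetD (PySem.List.pyGetD grid r []) c 0 ≠ 0
        then PySem.Set.add nz (r, c) else nz) nz) PySem.Set.empty
  let blk : Int × Int :=
    (PySem.List.pyRange 0 2 1).foldl (fun b r0 =>
      (PySem.List.pyRange 0 2 1).foldl (fun b c0 =>
        if ((PySem.List.pyRange 0 2 1).all fun dr =>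
              (PySem.List.pyRange 0 2 1).all fun dc =>
                PySem.Set.contains nz (r0 + dr, c0 + dc))
        then (r0, c0) else b) b) ((0 : Int), (0 : Int))
  let out : List (List Int) := (PySem.List.pyRange 0 9 1).map (fun _ => List.replicate 9 (0 : Int))
  let blocks : List (Int × Int) :=
    if blk.1 = 0 ∧ blk.2 = 0 then [(0, 0), (4, 4)]
    else if blk.1 = 0 ∧ blk.2 = 1 then [(0, 5), (4, 1)]
    else if blk.1 = 1 ∧ blk.2 = 0 then [(5, 0), (1, 4)]
    else [(1, 1), (5, 5)]
  blocks.foldl (fun out p =>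
    (PySem.List.pyRange 0 4 1).foldl (fun out dr =>
      (PySem.List.pyRange 0 4 1).foldl (fun out dc =>
        if 0 ≤ p.1 + dr ∧ p.1 + dr < 9 ∧ 0 ≤ p.2 + dc ∧ p.2 + dc < 9
        then PySem.List.pySetD out (p.1 + dr)
               (PySem.List.pySetD (PySem.List.pyGetD out (p.1 + dr) []) (p.2 + dc) 3)
        else out) out) out) out

-- ===== PORT B =====
def solve_4522001f_alt (grid : List (List Int)) : List (List Int) :=
  let g : Int → Int → Int := fun r c => PySem.List.pyGetD (PySem.List.pyGetD grid r []) c 0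
  let hits : List (Int × Int) :=
    ([0, 1] : List Int).flatMap (fun r =>
      ([0, 1] : List Int).filterMap (fun c =>
        if ¬ (([0, 1] : List Int).any fun dr =>
                ([0, 1] : List Int).any fun dc => g (r + dr) (c + dc) == 0)
        then some (r, c) else none))
  let blk : Int × Int := hits.getLast?.getD ((0 : Int), (0 : Int))
  (PySem.List.pyRange 0 9 1).foldl (fun rows i =>
    rows ++ [if blk.1 ≤ i ∧ i < blk.1 + 8 then
               let start : Int :=
                 if (decide (i - blk.1 < 4) == decide (blk.1 = blk.2)) then blk.2 else blk.2 + 4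
               List.replicate start.toNat (0 : Int) ++ List.replicate 4 3 ++
                 List.replicate (5 - start).toNat 0
             else List.replicate 9 (0 : Int)]) []

-- ===== PRECONDITION & SPEC =====
-- Pre_ excludes exactly the grids on which A raises IndexError: fewer than 3 rows,
-- or one of the first 3 rows shorter than 3.
def Pre_solve_4522001f (grid : List (List Int)) : Prop :=
  3 ≤ grid.length ∧ ∀ row ∈ grid.take 3, 3 ≤ row.length
instance (grid : List (List Int)) : Decidable (Pre_solve_4522001f grid) := by
  unfold Pre_solve_4522001f; infer_instance
def pvWitness_solve_4522001f : List (List Int) := [[1, 1, 0], [1, 1, 0], [0, 0, 0]]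
def Spec_solve_4522001f (grid : List (List Int)) (out : List (List Int)) : Prop := out = solve_4522001f_alt grid
instance (grid : List (List Int)) (out : List (List Int)) : Decidable (Spec_solve_4522001f grid out) := by unfold Spec_solve_4522001f; infer_instance

-- ===== CLAIM (what is proved, stated in full; the proofs are below) =====
def Claim_equal_solve_4522001f : Prop := ∀ (grid : List (List Int)), Dom_solve_4522001f grid → Pre_solve_4522001f grid → Spec_solve_4522001f grid (solve_4522001f grid)

-- ===== LEMMAS AND PROOFS =====

def pvG (grid : List (List Int)) (r c : Int) : Int :=
  PySem.List.pyGetD (PySem.List.pyGetD grid r []) c 0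

def pvNz (grid : List (List Int)) : PySem.Set (Int × Int) :=
  (PySem.List.pyRange 0 3 1).foldl (fun nz r =>
    (PySem.List.pyRange 0 3 1).foldl (fun nz c =>
      if PySem.List.pyGetD (PySem.List.pyGetD grid r []) c 0 ≠ 0
      then PySem.Set.add nz (r, c) else nz) nz) PySem.Set.empty

def pvBlkA (grid : List (List Int)) : Int × Int :=
  (PySem.List.pyRange 0 2 1).foldl (fun b r0 =>
    (PySem.List.pyRange 0 2 1).foldl (fun b c0 =>
      if ((PySem.List.pyRange 0 2 1).all fun dr =>
            (PySem.List.pyRange 0 2 1).all fun dc =>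
              PySem.Set.contains (pvNz grid) (r0 + dr, c0 + dc))
      then (r0, c0) else b) b) ((0 : Int), (0 : Int))

def pvBlkB (grid : List (List Int)) : Int × Int :=
  (([0, 1] : List Int).flatMap (fun r =>
    ([0, 1] : List Int).filterMap (fun c =>
      if ¬ (([0, 1] : List Int).any fun dr =>
              ([0, 1] : List Int).any fun dc => pvG grid (r + dr) (c + dc) == 0)
      then some (r, c) else none))).getLast?.getD ((0 : Int), (0 : Int))

def pvFillA (blk : Int × Int) : List (List Int) :=
  let out : List (List Int) := (PySem.List.pyRange 0 9 1).map (fun _ => List.replicate 9 (0 : Int))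
  let blocks : List (Int × Int) :=
    if blk.1 = 0 ∧ blk.2 = 0 then [(0, 0), (4, 4)]
    else if blk.1 = 0 ∧ blk.2 = 1 then [(0, 5), (4, 1)]
    else if blk.1 = 1 ∧ blk.2 = 0 then [(5, 0), (1, 4)]
    else [(1, 1), (5, 5)]
  blocks.foldl (fun out p =>
    (PySem.List.pyRange 0 4 1).foldl (fun out dr =>
      (PySem.List.pyRange 0 4 1).foldl (fun out dc =>
        if 0 ≤ p.1 + dr ∧ p.1 + dr < 9 ∧ 0 ≤ p.2 + dc ∧ p.2 + dc < 9
        then PySem.List.pySetD out (p.1 + dr)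
               (PySem.List.pySetD (PySem.List.pyGetD out (p.1 + dr) []) (p.2 + dc) 3)
        else out) out) out) out

def pvFillB (blk : Int × Int) : List (List Int) :=
  (PySem.List.pyRange 0 9 1).foldl (fun rows i =>
    rows ++ [if blk.1 ≤ i ∧ i < blk.1 + 8 then
               let start : Int :=
                 if (decide (i - blk.1 < 4) == decide (blk.1 = blk.2)) then blk.2 else blk.2 + 4
               List.replicate start.toNat (0 : Int) ++ List.replicate 4 3 ++
                 List.replicate (5 - start).toNat 0
             else List.replicate 9 (0 : Int)]) []

lemma solveA_eq (grid : List (List Int)) : solve_4522001f grid = pvFillA (pvBlkA grid) := rfl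

lemma solveB_eq (grid : List (List Int)) : solve_4522001f_alt grid = pvFillB (pvBlkB grid) := rfl

lemma mem_fold_inner (g : Int → Int → Int) (r : Int) (cs : List Int)
    (s : PySem.Set (Int × Int)) (q : Int × Int) :
    (q ∈ cs.foldl (fun s c => if g r c ≠ 0 then PySem.Set.add s (r, c) else s) s) ↔
      q ∈ s ∨ (q.1 = r ∧ q.2 ∈ cs ∧ g q.1 q.2 ≠ 0) := by
  induction cs generalizing s with
  | nil => simp
  | cons c cs ih =>
    simp only [List.foldl_cons]
    rw [ih]
    by_cases h : g r c ≠ 0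
    · obtain ⟨q1, q2⟩ := q
      simp only [if_pos h, PySem.Set.mem_add, List.mem_cons, Prod.mk.injEq]
      constructor
      · rintro ((hq | ⟨rfl, rfl⟩) | ⟨rfl, hq2, hq3⟩)
        · exact Or.inl hq
        · exact Or.inr ⟨rfl, Or.inl rfl, h⟩
        · exact Or.inr ⟨rfl, Or.inr hq2, hq3⟩
      · rintro (hq | ⟨rfl, (rfl | hq2), hq3⟩)
        · exact Or.inl (Or.inl hq)
        · exact Or.inl (Or.inr ⟨rfl, rfl⟩)
        · exact Or.inr ⟨rfl, hq2, hq3⟩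
    · obtain ⟨q1, q2⟩ := q
      simp only [if_neg h, List.mem_cons]
      constructor
      · rintro (hq | ⟨rfl, hq2, hq3⟩)
        · exact Or.inl hq
        · exact Or.inr ⟨rfl, Or.inr hq2, hq3⟩
      · rintro (hq | ⟨rfl, (rfl | hq2), hq3⟩)
        · exact Or.inl hq
        · exact absurd hq3 (by simpa using h)
        · exact Or.inr ⟨rfl, hq2, hq3⟩

lemma mem_fold_outer (g : Int → Int → Int) (rs cs : List Int)
    (s : PySem.Set (Int × Int)) (q : Int × Int) :
    (q ∈ rs.foldl (fun s r => cs.foldl (fun s c => if g r c ≠ 0 then PySem.Set.add s (r, c) else s) s) s) ↔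
      q ∈ s ∨ (q.1 ∈ rs ∧ q.2 ∈ cs ∧ g q.1 q.2 ≠ 0) := by
  induction rs generalizing s with
  | nil => simp
  | cons r rs ih =>
    simp only [List.foldl_cons]
    rw [ih, mem_fold_inner, List.mem_cons]
    tauto

lemma mem_pvNz (grid : List (List Int)) (a b : Int)
    (ha : 0 ≤ a) (ha' : a < 3) (hb : 0 ≤ b) (hb' : b < 3) :
    ((a, b) ∈ pvNz grid) ↔ pvG grid a b ≠ 0 := by
  unfold pvNz
  rw [mem_fold_outer (fun r c => PySem.List.pyGetD (PySem.List.pyGetD grid r []) c 0)]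
  simp [PySem.Set.empty, PySem.List.mem_pyRange_one, ha, ha', hb, hb', pvG]

lemma blk_eq (grid : List (List Int)) : pvBlkA grid = pvBlkB grid := by
  unfold pvBlkA pvBlkB
  rw [show PySem.List.pyRange 0 2 1 = [0, 1] from by decide]
  simp only [List.foldl_cons, List.foldl_nil, List.all_cons, List.all_nil,
    List.flatMap_cons, List.flatMap_nil, List.filterMap_cons, List.filterMap_nil,
    List.any_cons, List.any_nil]
  norm_num
  have e : ∀ a b : Int, 0 ≤ a → a < 3 → 0 ≤ b → b < 3 →
      (((a, b) ∈ pvNz grid) ↔ pvG grid a b ≠ 0) := fun a b ha ha' hb hb' =>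
    mem_pvNz grid a b ha ha' hb hb'
  simp only [e 0 1 (by norm_num) (by norm_num) (by norm_num) (by norm_num),
    e 0 2 (by norm_num) (by norm_num) (by norm_num) (by norm_num),
    e 1 0 (by norm_num) (by norm_num) (by norm_num) (by norm_num),
    e 1 1 (by norm_num) (by norm_num) (by norm_num) (by norm_num),
    e 1 2 (by norm_num) (by norm_num) (by norm_num) (by norm_num),
    e 2 0 (by norm_num) (by norm_num) (by norm_num) (by norm_num),
    e 2 1 (by norm_num) (by norm_num) (by norm_num) (by norm_num),
    e 2 2 (by norm_num) (by norm_num) (by norm_num) (by norm_num)]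
  split_ifs <;> simp_all

lemma blk_mem (grid : List (List Int)) :
    pvBlkA grid ∈ [((0 : Int), (0 : Int)), (0, 1), (1, 0), (1, 1)] := by
  unfold pvBlkA
  rw [show PySem.List.pyRange 0 2 1 = [0, 1] from by decide]
  simp only [List.foldl_cons, List.foldl_nil]
  split_ifs <;> simp

set_option maxRecDepth 20000 in
lemma fill_eq (blk : Int × Int)
    (h : blk ∈ [((0 : Int), (0 : Int)), (0, 1), (1, 0), (1, 1)]) :
    pvFillA blk = pvFillB blk := by
  simp only [List.mem_cons, List.not_mem_nil, or_false] at h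
  rcases h with h | h | h | h <;> rw [h] <;> decide

-- ===== VERDICT (by name: the statement is the Claim_ definition above) =====
theorem solve_4522001f_spec : Claim_equal_solve_4522001f := by
  intro grid _ _
  show solve_4522001f grid = solve_4522001f_alt grid
  rw [solveA_eq, solveB_eq, ← blk_eq]
  exact fill_eq _ (blk_mem grid)
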